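-- pv_equiv track=rewrite | github.com/langchain-ai/langchain | libs/partners/prompty/tests/unit_tests/fake_output_parser.py | extract_action_details
-- ===== SOURCE A (Python) =====
-- from typing import Optional, Tuple, Union
--
-- def extract_action_details(text: str) -> Tuple[Optional[str], Optional[str]]:
--     # Split the text into lines and strip whitespace
--     lines = [line.strip() for line in text.strip().split("\n")]
--
--     # Initialize variables to hold the extracted values
--     action = None
--     action_input = None
--
--     # Iterate through the lines to find and extract the desired information
--     for line in lines:
--         if line.startswith("Action:"):
--             action = line.split(":", 1)[1].strip()
--         elif line.startswith("Action Input:"):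
--             action_input = line.split(":", 1)[1].strip()
--
--     return action, action_input
-- ===== SOURCE B (Python) =====
-- from typing import Optional, Tuple
--
-- def extract_action_details(text: str) -> Tuple[Optional[str], Optional[str]]:
--     # Build a dict of all "key: value" fields in one pass, then look up the two keys.
--     fields = {}
--     for line in text.strip().split("\n"):
--         line = line.strip()
--         if ":" in line:
--             key, value = line.split(":", 1)
--             fields[key] = value.strip()
--     return fields.get("Action"), fields.get("Action Input")
-- ===== Notes on version B (the rewrite author's own statement) =====
-- stated objective: simpler
-- what changed: Replaces the two-variable scan with hard-coded startswith tests by a generic one-pass field dict (split each line on its first colon, last occurrence wins) followed by two lookups.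
import Mathlib
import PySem

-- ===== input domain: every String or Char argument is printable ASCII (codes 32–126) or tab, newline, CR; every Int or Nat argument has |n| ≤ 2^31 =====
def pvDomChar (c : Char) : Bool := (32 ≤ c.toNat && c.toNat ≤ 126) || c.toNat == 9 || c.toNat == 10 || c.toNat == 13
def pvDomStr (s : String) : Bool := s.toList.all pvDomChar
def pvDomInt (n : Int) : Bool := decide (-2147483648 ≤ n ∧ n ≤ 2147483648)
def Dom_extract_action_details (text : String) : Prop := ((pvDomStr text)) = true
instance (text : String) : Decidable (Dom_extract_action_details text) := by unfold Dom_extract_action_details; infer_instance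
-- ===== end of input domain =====

-- B replaces A's two-variable scan with hard-coded prefix tests by a generic field dict
-- (each line split on its first colon, last occurrence wins) followed by two lookups (objective: simpler).

-- ===== PORT A =====
-- line.split(":", 1)[1].strip()  (in A only evaluated under a startswith guard, so the index-1 access never fails)
def pvASplitTail (line : String) : String :=
  PySem.Str.strip ((((PySem.Str.splitMax? line ":" 1).getD [])[1]?).getD "")

def pvAStep (st : Option String × Option String) (line : String) : Option String × Option String :=
  if PySem.Str.startswith line "Action:" then (some (pvASplitTail line), st.2)
  else if PySem.Str.startswith line "Action Input:" then (st.1, some (pvASplitTail line))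
  else st

def extract_action_details (text : String) : Option String × Option String :=
  let lines := ((PySem.Str.split? (PySem.Str.strip text) "\n").getD []).map PySem.Str.strip
  lines.foldl pvAStep (none, none)

-- ===== PORT B =====
-- one line of the loop: strip, and if it contains a colon store fields[key] = value.strip()
def pvBStep (d : PySem.Dict String String) (rawLine : String) : PySem.Dict String String :=
  let line := PySem.Str.strip rawLine
  if PySem.Str.isIn ":" line then
    let parts := (PySem.Str.splitMax? line ":" 1).getD []
    d.insert (parts[0]?.getD "") (PySem.Str.strip (parts[1]?.getD ""))
  else d

def extract_action_details_alt (text : String) : Option String × Option String :=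
  let fields := ((PySem.Str.split? (PySem.Str.strip text) "\n").getD []).foldl pvBStep PySem.Dict.empty
  (fields.get? "Action", fields.get? "Action Input")

-- ===== PRECONDITION & SPEC =====
def Spec_extract_action_details (text : String) (out : Option String × Option String) : Prop := out = extract_action_details_alt text
instance (text : String) (out : Option String × Option String) : Decidable (Spec_extract_action_details text out) := by unfold Spec_extract_action_details; infer_instance

-- ===== CLAIM (what is proved, stated in full; the proofs are below) =====
def Claim_equal_extract_action_details : Prop := ∀ (text : String), Dom_extract_action_details text → Spec_extract_action_details text (extract_action_details text)

-- ===== LEMMAS AND PROOFS =====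

-- splitOnMax.go with maxsplit exhausted returns the remainder as one last piece
theorem pv_go0 (sep : List Char) (fuel : Nat) (l cur : List Char) (acc : List (List Char)) :
    PySem.Chars.splitOnMax.go sep fuel 0 l cur acc = acc.reverse ++ [cur.reverse ++ l] := by
  cases fuel with
  | zero => simp [PySem.Chars.splitOnMax.go]
  | succ f => cases l with
    | nil => simp [PySem.Chars.splitOnMax.go]
    | cons c rest => simp [PySem.Chars.splitOnMax.go]

-- splitOnMax.go on [':'] with maxsplit 1 splits at the first colon (if any)
theorem pv_go1 (l : List Char) (fuel : Nat) (cur : List Char) (acc : List (List Char))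
    (hf : l.length ≤ fuel) :
    PySem.Chars.splitOnMax.go [':'] (fuel + 1) 1 l cur acc =
      if ':' ∈ l then acc.reverse ++ [cur.reverse ++ l.takeWhile (· ≠ ':'), (l.dropWhile (· ≠ ':')).drop 1]
      else acc.reverse ++ [cur.reverse ++ l] := by
  induction l generalizing fuel cur acc with
  | nil => simp [PySem.Chars.splitOnMax.go]
  | cons c rest ih =>
    rw [PySem.Chars.splitOnMax.go]
    by_cases hc : c = ':'
    · subst hc
      simp [List.isPrefixOf, pv_go0]
    · have hcc : ¬ (':' = c) := fun h => hc h.symm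
      have hf' : rest.length ≤ fuel - 1 := by simp at hf; omega
      have hfe : fuel = (fuel - 1) + 1 := by simp at hf; omega
      simp only [List.isPrefixOf]
      rw [hfe, ih _ _ _ hf']
      by_cases hm : ':' ∈ rest <;> simp [hm, hc, hcc]

-- s.split(":", 1) characterised: split at the first colon
theorem pv_split1 (cs : List Char) :
    PySem.Chars.splitOnMax cs [':'] 1 =
      if ':' ∈ cs then [cs.takeWhile (· ≠ ':'), (cs.dropWhile (· ≠ ':')).drop 1] else [cs] := by
  rw [PySem.Chars.splitOnMax]
  norm_num
  rw [pv_go1 cs cs.length [] [] (le_refl _)]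
  by_cases hm : ':' ∈ cs <;> simp [hm]

theorem pv_takeWhile_of_no_colon (key : List Char) (hk : ':' ∉ key) :
    key.takeWhile (· ≠ ':') = key := by
  rw [List.takeWhile_eq_self_iff]; intro a ha; simp; exact fun he => hk (he ▸ ha)

-- a prefix "key:" forces the part before the first colon to be key
theorem pv_takeWhile_of_prefix (cs key t : List Char) (hk : ':' ∉ key)
    (h : cs = key ++ ':' :: t) : cs.takeWhile (· ≠ ':') = key := by
  subst h
  have h1 : key.takeWhile (· ≠ ':') = key := pv_takeWhile_of_no_colon key hk
  rw [List.takeWhile_append, h1]; simp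

theorem pv_dropWhile_head (cs : List Char) (h : ':' ∈ cs) :
    ∃ t, cs.dropWhile (· ≠ ':') = ':' :: t := by
  induction cs with
  | nil => simp at h
  | cons c cs ih =>
    by_cases hc : c = ':'
    · subst hc; exact ⟨cs, by simp⟩
    · rw [List.dropWhile_cons]
      simp only [hc, decide_false, Bool.not_false, if_true, ne_eq, decide_not]
      simpa using ih (by rcases List.mem_cons.mp h with h | h; exact absurd h.symm hc; exact h)

-- part-before-first-colon = key  ↔  the line starts with "key:"   (for colon-free key, colon in cs)
theorem pv_key_iff (cs key : List Char) (hk : ':' ∉ key) (hc : ':' ∈ cs) :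
    cs.takeWhile (· ≠ ':') = key ↔ (key ++ [':']) <+: cs := by
  constructor
  · intro h
    obtain ⟨t, ht⟩ := pv_dropWhile_head cs hc
    refine ⟨t, ?_⟩
    conv_rhs => rw [← List.takeWhile_append_dropWhile (p := fun c => decide (c ≠ ':')) (l := cs)]
    simp only at h ht ⊢
    rw [h, ht]; simp
  · intro ⟨t, ht⟩
    exact pv_takeWhile_of_prefix cs key t hk (by simpa using ht.symm)

-- the per-line step: A's update of the pair equals B's dict update read back through the two keys
theorem pv_step_eq (d : PySem.Dict String String) (l : String) :
    pvAStep (d.get? "Action", d.get? "Action Input") (PySem.Str.strip l)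
      = ((pvBStep d l).get? "Action", (pvBStep d l).get? "Action Input") := by
  set s := PySem.Str.strip l with hs
  have hswA : PySem.Str.startswith s "Action:" = (("Action".toList ++ [':']).isPrefixOf s.toList) := by
    rw [PySem.Str.startswith_eq, PySem.Chars.startswith,
      show ("Action:".toList) = "Action".toList ++ [':'] from by decide]
  have hswAI : PySem.Str.startswith s "Action Input:" = (("Action Input".toList ++ [':']).isPrefixOf s.toList) := by
    rw [PySem.Str.startswith_eq, PySem.Chars.startswith,
      show ("Action Input:".toList) = "Action Input".toList ++ [':'] from by decide]
  by_cases hc : ':' ∈ s.toList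
  · have hin : PySem.Str.isIn ":" s = true :=
      (PySem.Str.isIn_iff_infix _ _).mpr (by simpa using (List.singleton_infix_iff ':' s.toList).mpr hc)
    have hsplit : PySem.Str.splitMax? s ":" 1 =
        some [String.ofList (s.toList.takeWhile (· ≠ ':')), String.ofList ((s.toList.dropWhile (· ≠ ':')).drop 1)] := by
      rw [PySem.Str.splitMax?]
      have : ":".toList = [':'] := by decide
      rw [this, PySem.Chars.splitMax?, pv_split1]
      simp [hc]
    by_cases hA : ("Action".toList ++ [':']) <+: s.toList
    · have htake : s.toList.takeWhile (· ≠ ':') = "Action".toList :=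
        (pv_key_iff _ _ (by decide) hc).mpr hA
      have hkey : String.ofList (s.toList.takeWhile (· ≠ ':')) = "Action" := by rw [htake]; decide
      have hswA' : PySem.Str.startswith s "Action:" = true := by
        rw [hswA]; exact List.isPrefixOf_iff_prefix.mpr hA
      simp only [pvAStep, pvBStep, hswA', if_true, ← hs, hin, hsplit]
      simp only [ne_eq, decide_not] at hkey
      simp [hkey, pvASplitTail, hsplit,
        PySem.Dict.get?_insert_self, PySem.Dict.get?_insert_of_ne d _ (show ("Action Input" : String) ≠ "Action" by decide)]
    · by_cases hAI : ("Action Input".toList ++ [':']) <+: s.toList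
      · have htake : s.toList.takeWhile (· ≠ ':') = "Action Input".toList :=
          (pv_key_iff _ _ (by decide) hc).mpr hAI
        have hkey : String.ofList (s.toList.takeWhile (· ≠ ':')) = "Action Input" := by rw [htake]; decide
        have hswA' : PySem.Str.startswith s "Action:" = false := by
          rw [hswA]; simp only [Bool.eq_false_iff]; intro hpre
          exact hA (List.isPrefixOf_iff_prefix.mp hpre)
        have hswAI' : PySem.Str.startswith s "Action Input:" = true := by
          rw [hswAI]; exact List.isPrefixOf_iff_prefix.mpr hAI
        simp only [pvAStep, pvBStep, hswA', hswAI', if_true, Bool.false_eq_true, if_false, ← hs, hin, hsplit]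
        simp only [ne_eq, decide_not] at hkey
        simp [hkey, pvASplitTail, hsplit,
          PySem.Dict.get?_insert_self, PySem.Dict.get?_insert_of_ne d _ (show ("Action" : String) ≠ "Action Input" by decide)]
      · have hkeyA : String.ofList (s.toList.takeWhile (· ≠ ':')) ≠ "Action" := by
          intro h
          have : s.toList.takeWhile (· ≠ ':') = "Action".toList := by
            have := congrArg String.toList h; simpa [String.toList_ofList] using this
          exact hA ((pv_key_iff _ _ (by decide) hc).mp this)
        have hkeyAI : String.ofList (s.toList.takeWhile (· ≠ ':')) ≠ "Action Input" := by
          intro h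
          have : s.toList.takeWhile (· ≠ ':') = "Action Input".toList := by
            have := congrArg String.toList h; simpa [String.toList_ofList] using this
          exact hAI ((pv_key_iff _ _ (by decide) hc).mp this)
        have hswA' : PySem.Str.startswith s "Action:" = false := by
          rw [hswA]; simp only [Bool.eq_false_iff]; intro hpre
          exact hA (List.isPrefixOf_iff_prefix.mp hpre)
        have hswAI' : PySem.Str.startswith s "Action Input:" = false := by
          rw [hswAI]; simp only [Bool.eq_false_iff]; intro hpre
          exact hAI (List.isPrefixOf_iff_prefix.mp hpre)
        simp only [pvAStep, pvBStep, hswA', hswAI', Bool.false_eq_true, if_false, ← hs, hin, hsplit]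
        simp only [ne_eq, decide_not] at hkeyA hkeyAI
        simp [PySem.Dict.get?_insert_of_ne _ _ (Ne.symm hkeyA), PySem.Dict.get?_insert_of_ne _ _ (Ne.symm hkeyAI)]
  · have hin : PySem.Str.isIn ":" s = false := by
      rw [PySem.Str.isIn]
      apply (PySem.Chars.isIn_eq_false_iff _ _).mpr
      intro hinf
      exact hc ((List.singleton_infix_iff ':' s.toList).mp (by simpa using hinf))
    have hswA' : PySem.Str.startswith s "Action:" = false := by
      rw [hswA]; simp only [Bool.eq_false_iff]; intro hpre
      exact hc ((List.isPrefixOf_iff_prefix.mp hpre).mem (show (':' : Char) ∈ "Action".toList ++ [':'] by decide))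
    have hswAI' : PySem.Str.startswith s "Action Input:" = false := by
      rw [hswAI]; simp only [Bool.eq_false_iff]; intro hpre
      exact hc ((List.isPrefixOf_iff_prefix.mp hpre).mem (show (':' : Char) ∈ "Action Input".toList ++ [':'] by decide))
    simp only [pvAStep, pvBStep, ← hs, hswA', hswAI', hin, Bool.false_eq_true, if_false]

-- the whole loop: A's fold over stripped lines equals B's dict fold read back through the two keys
theorem pv_fold_eq (ls : List String) (d : PySem.Dict String String) :
    (ls.map PySem.Str.strip).foldl pvAStep (d.get? "Action", d.get? "Action Input")
      = ((ls.foldl pvBStep d).get? "Action", (ls.foldl pvBStep d).get? "Action Input") := by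
  induction ls generalizing d with
  | nil => rfl
  | cons l ls ih =>
    simp only [List.map_cons, List.foldl_cons]
    rw [pv_step_eq d l, ih (pvBStep d l)]

-- ===== VERDICT (by name: the statement is the Claim_ definition above) =====
theorem extract_action_details_spec : Claim_equal_extract_action_details := by
  intro text _
  unfold Spec_extract_action_details extract_action_details extract_action_details_alt
  have := pv_fold_eq ((PySem.Str.split? (PySem.Str.strip text) "\n").getD []) PySem.Dict.empty
  simpa [PySem.Dict.get?_empty] using this
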